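-- pv_equiv track=rewrite | github.com/MoerAI/algorithm | This-Is-Coding-Test/Ch13/competitive_infection.py | solution
-- ===== SOURCE A (Python) =====
-- from collections import deque
--
-- def solution(n, k, array):
--     row = array[n]
--     target_s, target_x, target_y = row[0], row[1], row[2]
--     graph = array[:n]
--
--     data = []
--
--     for i in range(n):
--         for j in range(n):
--             if graph[i][j] != 0:
--                 data.append((graph[i][j], 0, i, j))
--
--     data.sort()
--     q = deque(data)
--
--     dx = [-1, 0, 1, 0]
--     dy = [0, 1, 0, -1]
--
--     while q:
--         virus, s, x, y = q.popleft()
--         if s == target_s: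
--             break
--         for i in range(4):
--             nx = x + dx[i]
--             ny = y + dy[i]
--             if 0 <= nx < n and 0 <= ny < n:
--                 if graph[nx][ny] == 0:
--                     graph[nx][ny] = virus
--                     q.append((virus, s + 1, nx, ny))
--
--     return graph[target_x - 1][target_y - 1]
-- ===== SOURCE B (Python) =====
-- # Cellular-automaton re-implementation: no queue and no sort at all.  Each
-- # generation scans the whole grid once and every empty cell simultaneously takes
-- # the minimum virus number among its already-infected in-bounds neighbours
-- # (lower virus numbers expand first in A, so the minimum wins each second).
-- # Unlike A, this does not mutate `array`; the equivalence is about the return value.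
-- def solution(n, k, array):
--     row = array[n]
--     target_s, target_x, target_y = row[0], row[1], row[2]
--     grid = [list(r) for r in array[:n]]
--
--     s = 0
--     while s != target_s:
--         nxt = [list(r) for r in grid]
--         changed = False
--         for i in range(n):
--             for j in range(n):
--                 if grid[i][j] == 0:
--                     best = 0
--                     for ni, nj in ((i - 1, j), (i, j + 1), (i + 1, j), (i, j - 1)):
--                         if 0 <= ni < n and 0 <= nj < n and grid[ni][nj] != 0:
--                             v = grid[ni][nj]
--                             if best == 0 or v < best:
--                                 best = v
--                     if best != 0:
--                         nxt[i][j] = best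
--                         changed = True
--         grid = nxt
--         s += 1
--         if not changed:
--             break
--     return grid[target_x - 1][target_y - 1]
-- ===== Notes on version B (the rewrite author's own statement) =====
-- stated objective: alternative
-- what changed: Replaces the sorted multi-source BFS queue (seed list sorted by virus, deque of timestamped entries popped one by one) by a queue-free, sort-free cellular automaton: each generation rescans the whole grid and every empty cell simultaneously takes the minimum virus number among its infected in-bounds neighbours, stopping after target_s generations or at a fixed point.
import Mathlib
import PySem

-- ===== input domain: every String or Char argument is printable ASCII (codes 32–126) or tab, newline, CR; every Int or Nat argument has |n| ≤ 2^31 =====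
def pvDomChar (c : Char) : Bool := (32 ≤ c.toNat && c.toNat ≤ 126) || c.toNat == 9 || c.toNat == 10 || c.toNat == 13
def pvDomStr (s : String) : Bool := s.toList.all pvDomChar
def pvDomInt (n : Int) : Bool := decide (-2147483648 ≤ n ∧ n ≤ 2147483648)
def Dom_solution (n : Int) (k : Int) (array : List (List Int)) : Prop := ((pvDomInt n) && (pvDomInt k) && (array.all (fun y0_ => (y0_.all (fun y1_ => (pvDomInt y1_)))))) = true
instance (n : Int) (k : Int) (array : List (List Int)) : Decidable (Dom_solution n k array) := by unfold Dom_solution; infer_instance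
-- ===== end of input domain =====

-- B replaces A's sorted multi-source BFS queue by a queue-free, sort-free cellular
-- automaton (each generation rescans the grid; every empty cell takes the minimum
-- virus among its infected neighbours); objective: alternative, same result. A
-- mutates the rows of `array` in place, B does not — the equivalence proved here
-- is about the return value.

-- ===== PORT A =====
-- one neighbour step of A's inner `for i in range(4)` loop (state = (graph, q))
def solAStep (n virus s x y : Int)
    (st : List (List Int) × List (Int × Int × Int × Int)) (i : Int) :
    List (List Int) × List (Int × Int × Int × Int) :=
  let nx := x + PySem.List.pyGetD [(-1 : Int), 0, 1, 0] i 0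
  let ny := y + PySem.List.pyGetD [(0 : Int), 1, 0, -1] i 0
  if (0 ≤ nx ∧ nx < n) ∧ (0 ≤ ny ∧ ny < n) then
    if PySem.List.pyGetD (PySem.List.pyGetD st.1 nx []) ny 0 = 0 then
      (PySem.List.pySetD st.1 nx (PySem.List.pySetD (PySem.List.pyGetD st.1 nx []) ny virus),
       st.2 ++ [(virus, s + 1, nx, ny)])
    else st
  else st

-- A's `while q:` loop; `fuel` is a totality guard only (it bounds the number of
-- pops: each pop either removes an entry or first turns a 0-cell nonzero; the
-- caller passes more than that, so the `0` branch is never reached from `solution`)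
def solutionLoopA (fuel : Nat) (n target_s : Int) (g : List (List Int))
    (q : List (Int × Int × Int × Int)) : List (List Int) :=
  match q with
  | [] => g
  | (virus, s, x, y) :: q' =>
    match fuel with
    | 0 => g
    | fuel' + 1 =>
      if s = target_s then g
      else
        let st := (PySem.List.pyRange 0 4 1).foldl (solAStep n virus s x y) (g, q')
        solutionLoopA fuel' n target_s st.1 st.2

def solution (n : Int) (k : Int) (array : List (List Int)) : Int :=
  let row := PySem.List.pyGetD array n []
  let target_s := PySem.List.pyGetD row 0 0
  let target_x := PySem.List.pyGetD row 1 0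
  let target_y := PySem.List.pyGetD row 2 0
  let graph := PySem.List.slice array none (some n)
  let data := (PySem.List.pyRange 0 n 1).foldl (fun acc i =>
    (PySem.List.pyRange 0 n 1).foldl (fun acc j =>
      if PySem.List.pyGetD (PySem.List.pyGetD graph i []) j 0 ≠ 0 then
        acc ++ [(PySem.List.pyGetD (PySem.List.pyGetD graph i []) j 0, (0 : Int), i, j)]
      else acc) acc) []
  -- data.sort(): exact — data's 4-tuples are pairwise distinct with constant second
  -- component and (i, j) strictly increasing in generation order, so Python's
  -- lexicographic tuple sort coincides with this stable sort by the first component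
  let data' := PySem.List.sorted data (fun t => t.1) false
  let g := solutionLoopA (data'.length + (graph.flatMap (fun r => r)).length + 1)
             n target_s graph data'
  PySem.List.pyGetD (PySem.List.pyGetD g (target_x - 1) []) (target_y - 1) 0

-- ===== PORT B =====
-- B's innermost loop: minimum virus among the infected in-bounds neighbours of (i, j)
def solBBest (n : Int) (g : List (List Int)) (i j : Int) : Int :=
  [(i - 1, j), (i, j + 1), (i + 1, j), (i, j - 1)].foldl (fun best c =>
    if (0 ≤ c.1 ∧ c.1 < n) ∧ (0 ≤ c.2 ∧ c.2 < n) ∧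
        PySem.List.pyGetD (PySem.List.pyGetD g c.1 []) c.2 0 ≠ 0 then
      if best = 0 ∨ PySem.List.pyGetD (PySem.List.pyGetD g c.1 []) c.2 0 < best then
        PySem.List.pyGetD (PySem.List.pyGetD g c.1 []) c.2 0
      else best
    else best) 0

-- body of B's `for i … for j …` scan: state = (nxt, changed); reads only `g`
def solBScanCell (n : Int) (g : List (List Int))
    (st : List (List Int) × Bool) (ij : Int × Int) : List (List Int) × Bool :=
  if PySem.List.pyGetD (PySem.List.pyGetD g ij.1 []) ij.2 0 = 0 then
    if solBBest n g ij.1 ij.2 ≠ 0 then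
      (PySem.List.pySetD st.1 ij.1
        (PySem.List.pySetD (PySem.List.pyGetD st.1 ij.1 []) ij.2 (solBBest n g ij.1 ij.2)), true)
    else st
  else st

-- one generation: scan the whole grid once, simultaneous update into the copy
def solBGen (n : Int) (g : List (List Int)) : List (List Int) × Bool :=
  (PySem.List.pyRange 0 n 1).foldl (fun st i =>
    (PySem.List.pyRange 0 n 1).foldl (fun st j => solBScanCell n g st (i, j)) st) (g, false)

-- B's `while s != target_s:` loop; `fuel` is a totality guard only (a generation
-- recurses only after `changed`, which turns at least one 0-cell nonzero)
def solBLoop (fuel : Nat) (n target_s s : Int) (g : List (List Int)) : List (List Int) :=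
  if s = target_s then g
  else
    match fuel with
    | 0 => g
    | fuel' + 1 =>
      let st := solBGen n g
      if st.2 then solBLoop fuel' n target_s (s + 1) st.1 else st.1

def solution_alt (n : Int) (k : Int) (array : List (List Int)) : Int :=
  let row := PySem.List.pyGetD array n []
  let target_s := PySem.List.pyGetD row 0 0
  let target_x := PySem.List.pyGetD row 1 0
  let target_y := PySem.List.pyGetD row 2 0
  let grid := PySem.List.slice array none (some n)
  let g := solBLoop ((grid.flatMap (fun r => r)).length + 1) n target_s 0 grid
  PySem.List.pyGetD (PySem.List.pyGetD g (target_x - 1) []) (target_y - 1) 0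

-- ===== PRECONDITION & SPEC =====
-- Pre_solution is exactly where the Python returns: array[n] in (possibly negative)
-- range, the query row has the three entries read from it, every cell graph[i][j]
-- with 0 ≤ i,j < n that the seeding pass reads exists, and the final
-- graph[target_x-1][target_y-1] lookup is in (possibly negative) range.
def Pre_solution (n : Int) (k : Int) (array : List (List Int)) : Prop :=
  PySem.Raise.InRange array.length n ∧
  3 ≤ (PySem.List.pyGetD array n []).length ∧
  (0 < n → n ≤ (array.length : Int) ∧
    ∀ r ∈ array.take n.toNat, (n : Int) ≤ (r.length : Int)) ∧
  PySem.Raise.InRange (PySem.List.slice array none (some n)).length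
    (PySem.List.pyGetD (PySem.List.pyGetD array n []) 1 0 - 1) ∧
  PySem.Raise.InRange
    (PySem.List.pyGetD (PySem.List.slice array none (some n))
      (PySem.List.pyGetD (PySem.List.pyGetD array n []) 1 0 - 1) []).length
    (PySem.List.pyGetD (PySem.List.pyGetD array n []) 2 0 - 1)

instance (n : Int) (k : Int) (array : List (List Int)) : Decidable (Pre_solution n k array) := by
  unfold Pre_solution; infer_instance

def pvWitness_solution : Int × Int × List (List Int) := (2, 1, [[1, 0], [0, 0], [1, 1, 1]])

def Spec_solution (n : Int) (k : Int) (array : List (List Int)) (out : Int) : Prop := out = solution_alt n k array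
instance (n : Int) (k : Int) (array : List (List Int)) (out : Int) : Decidable (Spec_solution n k array out) := by unfold Spec_solution; infer_instance

-- ===== CLAIM (what is proved, stated in full; the proofs are below) =====
def Claim_equal_solution : Prop := ∀ (n : Int) (k : Int) (array : List (List Int)), Dom_solution n k array → Pre_solution n k array → Spec_solution n k array (solution n k array)

-- ===== LEMMAS AND PROOFS =====

-- tag a frontier entry (virus, x, y) with the generation counter s, giving A's queue entry
def tagS (s : Int) (e : Int × Int × Int) : Int × Int × Int × Int := (e.1, s, e.2.1, e.2.2)

def rowZeros (r : List Int) : Nat := r.countP (fun c => c == 0)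

def zerosG (g : List (List Int)) : Nat := (g.map rowZeros).sum

def ShapeG (n : Int) (g : List (List Int)) : Prop :=
  g.length = n.toNat ∧ ∀ r ∈ g, n.toNat ≤ r.length

-- A's neighbour step with the offset tables already evaluated to a coordinate
def solACoord (n virus s : Int) (st : List (List Int) × List (Int × Int × Int × Int))
    (c : Int × Int) : List (List Int) × List (Int × Int × Int × Int) :=
  if (0 ≤ c.1 ∧ c.1 < n) ∧ (0 ≤ c.2 ∧ c.2 < n) then
    if PySem.List.pyGetD (PySem.List.pyGetD st.1 c.1 []) c.2 0 = 0 then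
      (PySem.List.pySetD st.1 c.1 (PySem.List.pySetD (PySem.List.pyGetD st.1 c.1 []) c.2 virus),
       st.2 ++ [(virus, s + 1, c.1, c.2)])
    else st
  else st

-- the synchronous-layer intermediate (pure proof device): frontier entries carry
-- no timestamp; fStep writes one neighbour, bLayerF advances a whole generation
def fStep (n v : Int) (st : List (List Int) × List (Int × Int × Int))
    (c : Int × Int) : List (List Int) × List (Int × Int × Int) :=
  if (0 ≤ c.1 ∧ c.1 < n) ∧ (0 ≤ c.2 ∧ c.2 < n) ∧
      PySem.List.pyGetD (PySem.List.pyGetD st.1 c.1 []) c.2 0 = 0 then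
    (PySem.List.pySetD st.1 c.1 (PySem.List.pySetD (PySem.List.pyGetD st.1 c.1 []) c.2 v),
     st.2 ++ [(v, c.1, c.2)])
  else st

def bLayerF (n : Int) (st : List (List Int) × List (Int × Int × Int))
    (f : List (Int × Int × Int)) : List (List Int) × List (Int × Int × Int) :=
  f.foldl (fun st e =>
    [(e.2.1 - 1, e.2.2), (e.2.1, e.2.2 + 1), (e.2.1 + 1, e.2.2), (e.2.1, e.2.2 - 1)].foldl
      (fStep n e.1) st) st

def loopF (fuel : Nat) (n target_s s : Int) (g : List (List Int))
    (frontier : List (Int × Int × Int)) : List (List Int) :=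
  match frontier with
  | [] => g
  | _ :: _ =>
    if s = target_s then g
    else
      match fuel with
      | 0 => g
      | fuel' + 1 =>
        let st := bLayerF n (g, []) frontier
        loopF fuel' n target_s (s + 1) st.1 st.2

-- the seed list of A/the intermediate, and the intermediate program itself
def seedsB (n : Int) (graph : List (List Int)) : List (Int × Int × Int) :=
  (PySem.List.pyRange 0 n 1).foldl (fun acc i =>
    (PySem.List.pyRange 0 n 1).foldl (fun acc j =>
      if PySem.List.pyGetD (PySem.List.pyGetD graph i []) j 0 ≠ 0 then
        acc ++ [(PySem.List.pyGetD (PySem.List.pyGetD graph i []) j 0, i, j)]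
      else acc) acc) []

def midSolution (n : Int) (k : Int) (array : List (List Int)) : Int :=
  let row := PySem.List.pyGetD array n []
  let target_s := PySem.List.pyGetD row 0 0
  let target_x := PySem.List.pyGetD row 1 0
  let target_y := PySem.List.pyGetD row 2 0
  let graph := PySem.List.slice array none (some n)
  let frontier' := PySem.List.sorted (seedsB n graph) (fun t => t.1) false
  let g := loopF ((graph.flatMap (fun r => r)).length + 1) n target_s 0 graph frontier'
  PySem.List.pyGetD (PySem.List.pyGetD g (target_x - 1) []) (target_y - 1) 0

-- cell access / bounds / neighbourhood vocabulary of the proofs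
abbrev InB (n : Int) (c : Int × Int) : Prop := (0 ≤ c.1 ∧ c.1 < n) ∧ (0 ≤ c.2 ∧ c.2 < n)

def cellZ (g : List (List Int)) (c : Int × Int) : Int :=
  if 0 ≤ c.1 ∧ 0 ≤ c.2 then (g.getD c.1.toNat []).getD c.2.toNat 0 else 0

def nbrsOf (c : Int × Int) : List (Int × Int) :=
  [(c.1 - 1, c.2), (c.1, c.2 + 1), (c.1 + 1, c.2), (c.1, c.2 - 1)]

def cellsOf (l : List (Int × Int × Int)) : List (Int × Int) := l.map (·.2)

def bmin (b v : Int) : Int := if b = 0 ∨ v < b then v else b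

-- the invariant tying a grid to its current frontier
def InvF (n : Int) (g : List (List Int)) (f : List (Int × Int × Int)) : Prop :=
  ShapeG n g ∧
  (∀ e ∈ f, InB n e.2 ∧ cellZ g e.2 = e.1 ∧ e.1 ≠ 0) ∧
  (cellsOf f).Nodup ∧
  f.Pairwise (fun a b => a.1 ≤ b.1) ∧
  (∀ c, InB n c → cellZ g c = 0 →
    ∀ d ∈ nbrsOf c, InB n d → cellZ g d ≠ 0 → (cellZ g d, d) ∈ f)

-- ---------- A-port ⇒ layer intermediate (queue peeling) ----------

theorem solAStep_0 (n v s x y : Int) (st : List (List Int) × List (Int × Int × Int × Int)) :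
    solAStep n v s x y st 0 = solACoord n v s st (x - 1, y) := by
  have h1 : PySem.List.pyGetD [(-1 : Int), 0, 1, 0] 0 0 = -1 := by decide
  have h2 : PySem.List.pyGetD [(0 : Int), 1, 0, -1] 0 0 = 0 := by decide
  simp only [solAStep, solACoord, h1, h2]
  norm_num [sub_eq_add_neg]

theorem solAStep_1 (n v s x y : Int) (st : List (List Int) × List (Int × Int × Int × Int)) :
    solAStep n v s x y st 1 = solACoord n v s st (x, y + 1) := by
  have h1 : PySem.List.pyGetD [(-1 : Int), 0, 1, 0] 1 0 = 0 := by decide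
  have h2 : PySem.List.pyGetD [(0 : Int), 1, 0, -1] 1 0 = 1 := by decide
  simp only [solAStep, solACoord, h1, h2]
  norm_num

theorem solAStep_2 (n v s x y : Int) (st : List (List Int) × List (Int × Int × Int × Int)) :
    solAStep n v s x y st 2 = solACoord n v s st (x + 1, y) := by
  have h1 : PySem.List.pyGetD [(-1 : Int), 0, 1, 0] 2 0 = 1 := by decide
  have h2 : PySem.List.pyGetD [(0 : Int), 1, 0, -1] 2 0 = 0 := by decide
  simp only [solAStep, solACoord, h1, h2]
  norm_num

theorem solAStep_3 (n v s x y : Int) (st : List (List Int) × List (Int × Int × Int × Int)) :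
    solAStep n v s x y st 3 = solACoord n v s st (x, y - 1) := by
  have h1 : PySem.List.pyGetD [(-1 : Int), 0, 1, 0] 3 0 = 0 := by decide
  have h2 : PySem.List.pyGetD [(0 : Int), 1, 0, -1] 3 0 = -1 := by decide
  simp only [solAStep, solACoord, h1, h2]
  norm_num [sub_eq_add_neg]

theorem innerA_eq (n v s x y : Int) (st : List (List Int) × List (Int × Int × Int × Int)) :
    (PySem.List.pyRange 0 4 1).foldl (solAStep n v s x y) st
      = [(x - 1, y), (x, y + 1), (x + 1, y), (x, y - 1)].foldl (solACoord n v s) st := by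
  have h4 : PySem.List.pyRange 0 4 1 = [0, 1, 2, 3] := by decide
  rw [h4]
  simp only [List.foldl, solAStep_0, solAStep_1, solAStep_2, solAStep_3]

theorem step_rel (n v s : Int) (g : List (List Int)) (pre : List (Int × Int × Int × Int))
    (nxt : List (Int × Int × Int)) (c : Int × Int) :
    solACoord n v s (g, pre ++ nxt.map (tagS (s + 1))) c
      = ((fStep n v (g, nxt) c).1,
         pre ++ (fStep n v (g, nxt) c).2.map (tagS (s + 1))) := by
  simp only [solACoord, fStep]
  by_cases h1 : (0 ≤ c.1 ∧ c.1 < n) ∧ (0 ≤ c.2 ∧ c.2 < n)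
  · by_cases h2 : PySem.List.pyGetD (PySem.List.pyGetD g c.1 []) c.2 0 = 0
    · simp [h1, h2, tagS, List.map_append]
    · simp [h1, h2]
  · have h3 : ¬ ((0 ≤ c.1 ∧ c.1 < n) ∧ (0 ≤ c.2 ∧ c.2 < n) ∧
        PySem.List.pyGetD (PySem.List.pyGetD g c.1 []) c.2 0 = 0) := by tauto
    simp [h1, h3]

theorem coordFold_rel (n v s : Int) (pre : List (Int × Int × Int × Int)) :
    ∀ (cs : List (Int × Int)) (g : List (List Int)) (nxt : List (Int × Int × Int)),
    cs.foldl (solACoord n v s) (g, pre ++ nxt.map (tagS (s + 1)))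
      = ((cs.foldl (fStep n v) (g, nxt)).1,
         pre ++ (cs.foldl (fStep n v) (g, nxt)).2.map (tagS (s + 1))) := by
  intro cs
  induction cs with
  | nil => intro g nxt; rfl
  | cons c cs ih =>
    intro g nxt
    simp only [List.foldl]
    rw [step_rel]
    rw [ih (fStep n v (g, nxt) c).1 (fStep n v (g, nxt) c).2]

theorem layer_rel (n tS s : Int) (hs : s ≠ tS) :
    ∀ (rest : List (Int × Int × Int)) (g : List (List Int)) (nxt : List (Int × Int × Int))
      (fuelA : Nat), rest.length ≤ fuelA →
    solutionLoopA fuelA n tS g (rest.map (tagS s) ++ nxt.map (tagS (s + 1)))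
      = solutionLoopA (fuelA - rest.length) n tS (bLayerF n (g, nxt) rest).1
          ((bLayerF n (g, nxt) rest).2.map (tagS (s + 1))) := by
  intro rest
  induction rest with
  | nil => intro g nxt fuelA _; simp [bLayerF]
  | cons e rest ih =>
    intro g nxt fuelA hf
    obtain ⟨v, x, y⟩ := e
    match fuelA with
    | 0 => simp at hf
    | fa + 1 =>
      have hq : (((v, x, y) :: rest).map (tagS s) ++ nxt.map (tagS (s + 1)))
          = (v, s, x, y) :: (rest.map (tagS s) ++ nxt.map (tagS (s + 1))) := by
        simp [tagS]
      rw [hq, solutionLoopA]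
      simp only [hs, if_false]
      rw [innerA_eq, coordFold_rel]
      have hstep := ih (([(x - 1, y), (x, y + 1), (x + 1, y), (x, y - 1)].foldl
          (fStep n v) (g, nxt)).1)
        (([(x - 1, y), (x, y + 1), (x + 1, y), (x, y - 1)].foldl (fStep n v) (g, nxt)).2)
        fa (by simpa using Nat.le_of_succ_le_succ hf)
      simp only [Prod.mk.eta] at hstep
      rw [hstep]
      simp only [List.length_cons, Nat.succ_sub_succ]
      rfl

-- writing virus v into an in-range 0-cell: row lengths kept, one fewer zero
theorem cell_write (n : Int) (g : List (List Int)) (a b v : Int) (hS : ShapeG n g)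
    (ha : 0 ≤ a ∧ a < n) (hb : 0 ≤ b ∧ b < n)
    (h0 : PySem.List.pyGetD (PySem.List.pyGetD g a []) b 0 = 0) (hv : v ≠ 0) :
    (PySem.List.pySetD g a (PySem.List.pySetD (PySem.List.pyGetD g a []) b v)).map List.length
        = g.map List.length ∧
    zerosG (PySem.List.pySetD g a (PySem.List.pySetD (PySem.List.pyGetD g a []) b v)) + 1
        = zerosG g := by
  obtain ⟨hlen, hrows⟩ := hS
  have hi : a.toNat < g.length := by omega
  have hrow : PySem.List.pyGetD g a [] = g[a.toNat] :=
    PySem.List.pyGetD_eq_getElem g ([] : List Int) ha.1 (by omega)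
  have hrlen : n.toNat ≤ (g[a.toNat]).length := hrows _ (List.getElem_mem hi)
  have hj : b.toNat < (g[a.toNat]).length := by omega
  have hcell : g[a.toNat][b.toNat] = 0 := by
    have h2 := PySem.List.pyGetD_eq_getElem (PySem.List.pyGetD g a []) (0 : Int)
      hb.1 (by rw [hrow]; omega)
    rw [h2] at h0
    simpa [hrow] using h0
  have hset1 : PySem.List.pySetD (PySem.List.pyGetD g a []) b v
      = (g[a.toNat]).set b.toNat v := by
    rw [PySem.List.pySetD_of_nonneg (PySem.List.pyGetD g a []) v hb.1, hrow]
  have hset2 : PySem.List.pySetD g a (PySem.List.pySetD (PySem.List.pyGetD g a []) b v)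
      = g.set a.toNat ((g[a.toNat]).set b.toNat v) := by
    rw [hset1, PySem.List.pySetD_of_nonneg g _ ha.1]
  constructor
  · rw [hset2, List.map_set, List.length_set]
    have : (g.map List.length)[a.toNat]'(by simpa using hi) = (g[a.toNat]).length := by
      simp
    rw [← this, List.set_getElem_self]
  · have hrz : rowZeros ((g[a.toNat]).set b.toNat v) + 1 = rowZeros g[a.toNat] := by
    -- countP of set at a zero cell written with v ≠ 0
      simp only [rowZeros]
      rw [List.countP_set hj]
      have hvz : ((v == (0 : Int)) : Bool) = false := by simpa using hv
      have hcz : ((g[a.toNat][b.toNat] == (0 : Int)) : Bool) = true := by simpa using hcell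
      have hpos : 0 < (g[a.toNat]).countP (fun c => c == 0) := by
        rw [List.countP_pos_iff]
        exact ⟨g[a.toNat][b.toNat], List.getElem_mem hj, hcz⟩
      rw [hcz, hvz]
      simp
      omega
    rw [hset2]
    simp only [zerosG, List.map_set]
    rw [List.sum_set]
    conv_rhs => rw [show (g.map rowZeros) = (g.map rowZeros).set a.toNat ((g.map rowZeros)[a.toNat]'(by simpa using hi)) from (List.set_getElem_self (by simpa using hi)).symm]
    rw [List.sum_set]
    have hg1 : (g.map rowZeros)[a.toNat]'(by simpa using hi) = rowZeros g[a.toNat] := by simp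
    rw [hg1]
    simp only [List.length_map]
    rw [if_pos hi, if_pos hi]
    omega

theorem ShapeG_of_mapLen (n : Int) (g g' : List (List Int))
    (h : g'.map List.length = g.map List.length) (hS : ShapeG n g) : ShapeG n g' := by
  constructor
  · have hlen : g'.length = g.length := by
      have := congrArg List.length h; simpa using this
    rw [hlen, hS.1]
  · intro r hr
    have : r.length ∈ g'.map List.length := List.mem_map_of_mem hr
    rw [h] at this
    obtain ⟨r0, hr0, hlen⟩ := List.mem_map.mp this
    exact hlen ▸ hS.2 r0 hr0

theorem fStep_inv (n v : Int) (st : List (List Int) × List (Int × Int × Int))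
    (c : Int × Int) (hv : v ≠ 0) (hS : ShapeG n st.1) :
    (fStep n v st c).1.map List.length = st.1.map List.length ∧
    zerosG (fStep n v st c).1 + (fStep n v st c).2.length
        = zerosG st.1 + st.2.length ∧
    ∀ e ∈ (fStep n v st c).2, e.1 = v ∨ e ∈ st.2 := by
  simp only [fStep]
  by_cases h : (0 ≤ c.1 ∧ c.1 < n) ∧ (0 ≤ c.2 ∧ c.2 < n) ∧
      PySem.List.pyGetD (PySem.List.pyGetD st.1 c.1 []) c.2 0 = 0
  · obtain ⟨h1, h2, h3⟩ := h
    have hw := cell_write n st.1 c.1 c.2 v hS h1 h2 h3 hv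
    simp only [if_pos (by tauto : (0 ≤ c.1 ∧ c.1 < n) ∧ (0 ≤ c.2 ∧ c.2 < n) ∧
      PySem.List.pyGetD (PySem.List.pyGetD st.1 c.1 []) c.2 0 = 0)]
    refine ⟨hw.1, ?_, ?_⟩
    · simp only [List.length_append, List.length_cons, List.length_nil]
      omega
    · intro e he
      rcases List.mem_append.mp he with h | h
      · exact Or.inr h
      · simp at h; subst h; exact Or.inl rfl
  · rw [if_neg h]
    exact ⟨rfl, rfl, fun e he => Or.inr he⟩

theorem coordFold_inv (n v : Int) (hv : v ≠ 0) :
    ∀ (cs : List (Int × Int)) (st : List (List Int) × List (Int × Int × Int)),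
      ShapeG n st.1 →
    (cs.foldl (fStep n v) st).1.map List.length = st.1.map List.length ∧
    zerosG (cs.foldl (fStep n v) st).1 + (cs.foldl (fStep n v) st).2.length
        = zerosG st.1 + st.2.length ∧
    ∀ e ∈ (cs.foldl (fStep n v) st).2, e.1 = v ∨ e ∈ st.2 := by
  intro cs
  induction cs with
  | nil => intro st _; exact ⟨rfl, rfl, fun e he => Or.inr he⟩
  | cons c cs ih =>
    intro st hS
    have h1 := fStep_inv n v st c hv hS
    have h2 := ih (fStep n v st c) (ShapeG_of_mapLen n st.1 _ h1.1 hS)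
    simp only [List.foldl]
    refine ⟨h2.1.trans h1.1, by omega, ?_⟩
    intro e he
    rcases h2.2.2 e he with h | h
    · exact Or.inl h
    · exact h1.2.2 e h

theorem layer_inv (n : Int) :
    ∀ (f : List (Int × Int × Int)) (st : List (List Int) × List (Int × Int × Int)),
      (∀ e ∈ f, e.1 ≠ 0) → (∀ e ∈ st.2, e.1 ≠ 0) → ShapeG n st.1 →
    (bLayerF n st f).1.map List.length = st.1.map List.length ∧
    zerosG (bLayerF n st f).1 + (bLayerF n st f).2.length = zerosG st.1 + st.2.length ∧
    ∀ e ∈ (bLayerF n st f).2, e.1 ≠ 0 := by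
  intro f
  induction f with
  | nil => intro st _ h2 _; exact ⟨rfl, rfl, h2⟩
  | cons e f ih =>
    intro st hf h2 hS
    have hv : e.1 ≠ 0 := hf e (List.mem_cons_self)
    have h1 := coordFold_inv n e.1 hv
      [(e.2.1 - 1, e.2.2), (e.2.1, e.2.2 + 1), (e.2.1 + 1, e.2.2), (e.2.1, e.2.2 - 1)] st hS
    set st1 := [(e.2.1 - 1, e.2.2), (e.2.1, e.2.2 + 1), (e.2.1 + 1, e.2.2),
      (e.2.1, e.2.2 - 1)].foldl (fStep n e.1) st with hst1
    have hmem : ∀ e2 ∈ st1.2, e2.1 ≠ 0 := by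
      intro e2 he2
      rcases h1.2.2 e2 he2 with h | h
      · rw [h]; exact hv
      · exact h2 e2 h
    have h3 := ih st1 (fun e2 he2 => hf e2 (List.mem_cons_of_mem e he2)) hmem
      (ShapeG_of_mapLen n st.1 _ h1.1 hS)
    have : bLayerF n st (e :: f) = bLayerF n st1 f := rfl
    rw [this]
    exact ⟨h3.1.trans h1.1, by omega, h3.2.2⟩

theorem run_rel (n tS : Int) :
    ∀ (fuelB : Nat) (s : Int) (g : List (List Int)) (f : List (Int × Int × Int))
      (fuelA : Nat), ShapeG n g → (∀ e ∈ f, e.1 ≠ 0) →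
      f.length + zerosG g ≤ fuelA → zerosG g < fuelB →
    solutionLoopA fuelA n tS g (f.map (tagS s)) = loopF fuelB n tS s g f := by
  intro fuelB
  induction fuelB with
  | zero => intro _ _ _ _ _ _ _ hB; omega
  | succ fb ih =>
    intro s g f fuelA hS hf hA hB
    match f with
    | [] => cases fuelA <;> rfl
    | e :: f' =>
      obtain ⟨v, x, y⟩ := e
      by_cases hs : s = tS
      · subst hs
        cases fuelA <;> simp [tagS, solutionLoopA, loopF]
      · have hq : ((v, x, y) :: f').map (tagS s)
            = ((v, x, y) :: f').map (tagS s) ++ ([] : List (Int × Int × Int)).map (tagS (s + 1)) := by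
          simp
        rw [hq, layer_rel n tS s hs ((v, x, y) :: f') g [] fuelA (by omega)]
        have hinv := layer_inv n ((v, x, y) :: f') (g, []) hf (by simp) hS
        have hS' : ShapeG n (bLayerF n (g, []) ((v, x, y) :: f')).1 :=
          ShapeG_of_mapLen n g _ hinv.1 hS
        rw [show loopF (fb + 1) n tS s g ((v, x, y) :: f')
            = loopF fb n tS (s + 1) (bLayerF n (g, []) ((v, x, y) :: f')).1
                (bLayerF n (g, []) ((v, x, y) :: f')).2 by
          rw [loopF]; simp [hs]]
        by_cases hnx : (bLayerF n (g, []) ((v, x, y) :: f')).2 = []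
        · rw [hnx]
          simp only [List.map_nil]
          rw [solutionLoopA.eq_def, loopF.eq_def]
        · have hlen : 0 < (bLayerF n (g, []) ((v, x, y) :: f')).2.length :=
            List.length_pos_iff.mpr hnx
          have hz := hinv.2.1
          simp only [List.length_nil, Nat.add_zero] at hz
          exact ih (s + 1) (bLayerF n (g, []) ((v, x, y) :: f')).1
            (bLayerF n (g, []) ((v, x, y) :: f')).2 (fuelA - ((v, x, y) :: f').length) hS'
            hinv.2.2 (by omega) (by omega)

theorem seedsB_flat (n : Int) (graph : List (List Int)) :
    seedsB n graph
      = (PySem.List.pyRange 0 n 1).flatMap (fun i =>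
        ((PySem.List.pyRange 0 n 1).filter
          (fun j => decide (PySem.List.pyGetD (PySem.List.pyGetD graph i []) j 0 ≠ 0))).map
          (fun j => (PySem.List.pyGetD (PySem.List.pyGetD graph i []) j 0, i, j))) := by
  have hB : ∀ acc, ((PySem.List.pyRange 0 n 1).foldl (fun acc i =>
      (PySem.List.pyRange 0 n 1).foldl (fun acc j =>
        if PySem.List.pyGetD (PySem.List.pyGetD graph i []) j 0 ≠ 0 then
          acc ++ [(PySem.List.pyGetD (PySem.List.pyGetD graph i []) j 0, i, j)]
        else acc) acc) acc)
      = acc ++ (PySem.List.pyRange 0 n 1).flatMap (fun i =>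
        ((PySem.List.pyRange 0 n 1).filter
          (fun j => decide (PySem.List.pyGetD (PySem.List.pyGetD graph i []) j 0 ≠ 0))).map
          (fun j => (PySem.List.pyGetD (PySem.List.pyGetD graph i []) j 0, i, j))) := by
    intro acc
    rw [PySem.List.foldl_congr_mem' _ _ _ _
      (fun i _ acc => PySem.List.foldl_append_ite _ _ _ acc)]
    exact PySem.List.foldl_append_eq_flatMap _ _ _
  rw [seedsB, hB, List.nil_append]

-- the seed builders: A's list is the intermediate's list with every entry tagged with time 0
theorem builder_eq (n : Int) (graph : List (List Int)) :
    ((PySem.List.pyRange 0 n 1).foldl (fun acc i =>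
      (PySem.List.pyRange 0 n 1).foldl (fun acc j =>
        if PySem.List.pyGetD (PySem.List.pyGetD graph i []) j 0 ≠ 0 then
          acc ++ [(PySem.List.pyGetD (PySem.List.pyGetD graph i []) j 0, (0 : Int), i, j)]
        else acc) acc) [])
    = (seedsB n graph).map (tagS 0) := by
  have hA : ∀ acc, ((PySem.List.pyRange 0 n 1).foldl (fun acc i =>
      (PySem.List.pyRange 0 n 1).foldl (fun acc j =>
        if PySem.List.pyGetD (PySem.List.pyGetD graph i []) j 0 ≠ 0 then
          acc ++ [(PySem.List.pyGetD (PySem.List.pyGetD graph i []) j 0, (0 : Int), i, j)]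
        else acc) acc) acc)
      = acc ++ (PySem.List.pyRange 0 n 1).flatMap (fun i =>
        ((PySem.List.pyRange 0 n 1).filter
          (fun j => decide (PySem.List.pyGetD (PySem.List.pyGetD graph i []) j 0 ≠ 0))).map
          (fun j => (PySem.List.pyGetD (PySem.List.pyGetD graph i []) j 0, (0 : Int), i, j))) := by
    intro acc
    rw [PySem.List.foldl_congr_mem' _ _ _ _
      (fun i _ acc => PySem.List.foldl_append_ite _ _ _ acc)]
    exact PySem.List.foldl_append_eq_flatMap _ _ _
  rw [hA, seedsB_flat]
  simp only [List.nil_append, List.map_flatMap, List.map_map]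
  rfl

theorem insertBy_map_tag (x : Int × Int × Int) (l : List (Int × Int × Int)) :
    PySem.List.insertBy (fun a b => decide (a.1 < b.1)) (tagS 0 x) (l.map (tagS 0))
      = (PySem.List.insertBy (fun a b => decide (a.1 < b.1)) x l).map (tagS 0) := by
  induction l with
  | nil => rfl
  | cons y l ih =>
    simp only [List.map_cons, PySem.List.insertBy]
    by_cases h : x.1 < y.1
    · simp [tagS, h]
    · simp only [tagS, decide_eq_true_eq, h, if_false, List.map_cons]
      rw [← ih]
      simp [tagS]

theorem sorted_map_tag (l : List (Int × Int × Int)) :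
    PySem.List.sorted (l.map (tagS 0)) (fun t => t.1) false
      = (PySem.List.sorted l (fun t => t.1) false).map (tagS 0) := by
  rw [PySem.List.sorted_eq_foldl_insertBy, PySem.List.sorted_eq_foldl_insertBy]
  have h : ∀ (l : List (Int × Int × Int)) (acc : List (Int × Int × Int)),
      (l.map (tagS 0)).foldl
        (fun acc x => PySem.List.insertBy (fun a b => decide (a.1 < b.1)) x acc)
        (acc.map (tagS 0))
      = (l.foldl (fun acc x => PySem.List.insertBy (fun a b => decide (a.1 < b.1)) x acc)
          acc).map (tagS 0) := by
    intro l
    induction l with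
    | nil => intro acc; rfl
    | cons x l ih =>
      intro acc
      simp only [List.map_cons, List.foldl]
      rw [insertBy_map_tag, ih]
  simpa using h l []

theorem zerosG_le_flatlen (g : List (List Int)) :
    zerosG g ≤ (g.flatMap (fun r => r)).length := by
  induction g with
  | nil => simp [zerosG]
  | cons r g ih =>
    simp only [zerosG, List.map_cons, List.sum_cons, List.flatMap_cons, List.length_append]
    have hr : rowZeros r ≤ r.length := by
      simpa [rowZeros] using List.countP_le_length (p := fun c => c == 0) (l := r)
    simp only [zerosG] at ih
    omega

-- ---------- generic facts about cells and single writes ----------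

theorem pyGetD_nonneg {α : Type} (l : List α) (i : Int) (d : α) (h : 0 ≤ i) :
    PySem.List.pyGetD l i d = l.getD i.toNat d := by
  have : i = ((i.toNat : Nat) : Int) := by omega
  rw [this, PySem.List.pyGetD_natCast]
  congr 1

theorem cellZ_eq_py (g : List (List Int)) (c : Int × Int) (h1 : 0 ≤ c.1) (h2 : 0 ≤ c.2) :
    PySem.List.pyGetD (PySem.List.pyGetD g c.1 []) c.2 0 = cellZ g c := by
  rw [pyGetD_nonneg g c.1 [] h1, pyGetD_nonneg _ c.2 0 h2, cellZ, if_pos ⟨h1, h2⟩]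

theorem write_char (n : Int) (g : List (List Int)) (c : Int × Int) (v : Int)
    (hS : ShapeG n g) (hc : InB n c) :
    (PySem.List.pySetD g c.1 (PySem.List.pySetD (PySem.List.pyGetD g c.1 []) c.2 v)).map
        List.length = g.map List.length ∧
    (∀ c', cellZ (PySem.List.pySetD g c.1
        (PySem.List.pySetD (PySem.List.pyGetD g c.1 []) c.2 v)) c'
      = if c' = c then v else cellZ g c') := by
  obtain ⟨hlen, hrows⟩ := hS
  obtain ⟨⟨ha0, han⟩, ⟨hb0, hbn⟩⟩ := hc
  have hi : c.1.toNat < g.length := by omega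
  have hrow : PySem.List.pyGetD g c.1 [] = g[c.1.toNat] := by
    rw [pyGetD_nonneg g c.1 [] ha0, List.getD_eq_getElem g [] hi]
  have hrlen : n.toNat ≤ (g[c.1.toNat]).length := hrows _ (List.getElem_mem hi)
  have hj : c.2.toNat < (g[c.1.toNat]).length := by omega
  have hset : PySem.List.pySetD g c.1 (PySem.List.pySetD (PySem.List.pyGetD g c.1 []) c.2 v)
      = g.set c.1.toNat ((g[c.1.toNat]).set c.2.toNat v) := by
    rw [PySem.List.pySetD_of_nonneg _ v hb0, hrow, PySem.List.pySetD_of_nonneg g _ ha0]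
  rw [hset]
  constructor
  · rw [List.map_set, List.length_set]
    have h2 : (g.map List.length)[c.1.toNat]'(by simpa using hi) = (g[c.1.toNat]).length := by
      simp
    rw [← h2, List.set_getElem_self]
  · have houter : ∀ i' : Nat, (g.set c.1.toNat (g[c.1.toNat].set c.2.toNat v)).getD i' []
        = if i' = c.1.toNat then g[c.1.toNat].set c.2.toNat v else g.getD i' [] := by
      intro i'
      by_cases h : i' = c.1.toNat
      · subst h
        rw [if_pos rfl, List.getD_eq_getElem _ [] (by simpa using hi), List.getElem_set_self]
      · rw [if_neg h, List.getD_eq_getElem?_getD, List.getElem?_set_ne (fun hh => h hh.symm),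
          ← List.getD_eq_getElem?_getD]
    have hinner : ∀ j' : Nat, (g[c.1.toNat].set c.2.toNat v).getD j' 0
        = if j' = c.2.toNat then v else (g[c.1.toNat]).getD j' 0 := by
      intro j'
      by_cases h : j' = c.2.toNat
      · subst h
        rw [if_pos rfl, List.getD_eq_getElem _ 0 (by simpa using hj), List.getElem_set_self]
      · rw [if_neg h, List.getD_eq_getElem?_getD, List.getElem?_set_ne (fun hh => h hh.symm),
          ← List.getD_eq_getElem?_getD]
    intro c'
    by_cases hpos : 0 ≤ c'.1 ∧ 0 ≤ c'.2
    · rw [cellZ, cellZ, if_pos hpos, if_pos hpos, houter]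
      by_cases heq : c' = c
      · subst heq
        rw [if_pos rfl, if_pos rfl, hinner, if_pos rfl]
      · by_cases hrow' : c'.1.toNat = c.1.toNat
        · have hcol : c'.2.toNat ≠ c.2.toNat := by
            intro h
            apply heq
            have e1 : c'.1 = c.1 := by omega
            have e2 : c'.2 = c.2 := by omega
            exact Prod.ext e1 e2
          rw [if_pos hrow', if_neg heq, hinner, if_neg hcol, hrow',
            List.getD_eq_getElem g [] hi]
        · rw [if_neg hrow', if_neg heq]
    · rw [cellZ, cellZ, if_neg hpos, if_neg hpos]
      by_cases heq : c' = c
      · subst heq; exact absurd ⟨ha0, hb0⟩ hpos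
      · rw [if_neg heq]

theorem cellZ_nat (g : List (List Int)) (a b : Nat) (ha : a < g.length)
    (hb : b < (g[a]).length) : cellZ g ((a : Int), (b : Int)) = g[a][b] := by
  rw [cellZ, if_pos (by constructor <;> simp)]
  simp only [Int.toNat_natCast]
  rw [List.getD_eq_getElem g [] ha, List.getD_eq_getElem _ 0 hb]

theorem grid_ext (g1 g2 : List (List Int))
    (hp : g1.map List.length = g2.map List.length)
    (hc : ∀ c : Int × Int, cellZ g1 c = cellZ g2 c) : g1 = g2 := by
  have hlen : g1.length = g2.length := by
    have := congrArg List.length hp; simpa using this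
  apply List.ext_getElem hlen
  intro a h1 h2
  have hrl : (g1[a]).length = (g2[a]).length := by
    have e1 : (g1.map List.length)[a]'(by simpa using h1) = (g1[a]).length := by simp
    have e2 : (g2.map List.length)[a]'(by simpa using h2) = (g2[a]).length := by simp
    rw [← e1, ← e2]
    congr 1
  apply List.ext_getElem hrl
  intro b hb1 hb2
  rw [← cellZ_nat g1 a b h1 hb1, ← cellZ_nat g2 a b h2 hb2]
  exact hc _

theorem filterMap_guard {α : Type} (L : List α) (p : α → Prop) [DecidablePred p] :
    L.filterMap (fun c => if p c then some c else none) = L.filter (fun c => decide (p c)) := by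
  induction L with
  | nil => rfl
  | cons a L ih =>
    rw [List.filterMap_cons, List.filter_cons]
    by_cases h : p a
    · rw [if_pos h, if_pos (decide_eq_true h), ih]
    · rw [if_neg h, if_neg (by simpa using h), ih]

theorem nbr_symm (c d : Int × Int) : d ∈ nbrsOf c ↔ c ∈ nbrsOf d := by
  obtain ⟨a, b⟩ := c; obtain ⟨x, y⟩ := d
  simp only [nbrsOf, List.mem_cons, List.not_mem_nil, or_false, Prod.mk.injEq]
  omega

theorem nbrsOf_nodup (c : Int × Int) : (nbrsOf c).Nodup := by
  obtain ⟨a, b⟩ := c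
  have : ((a-1,b) : Int×Int) ≠ (a, b+1) ∧ ((a-1,b) : Int×Int) ≠ (a+1,b) ∧ ((a-1,b) : Int×Int) ≠ (a,b-1)
      ∧ ((a,b+1) : Int×Int) ≠ (a+1,b) ∧ ((a,b+1) : Int×Int) ≠ (a,b-1) ∧ ((a+1,b) : Int×Int) ≠ (a,b-1) := by
    refine ⟨?_,?_,?_,?_,?_,?_⟩ <;> (intro h; rw [Prod.mk.injEq] at h; omega)
  simp only [nbrsOf, List.nodup_cons, List.mem_cons, List.not_mem_nil, or_false,
    List.nodup_nil, and_true, not_or]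
  tauto

-- ---------- the layer step, cell by cell ----------

theorem fStep_char (n v : Int) (st : List (List Int) × List (Int × Int × Int))
    (c : Int × Int) (hS : ShapeG n st.1) :
    (fStep n v st c).1.map List.length = st.1.map List.length ∧
    (fStep n v st c).2 = st.2 ++ (if InB n c ∧ cellZ st.1 c = 0 then [(v, c)] else []) ∧
    (∀ c', cellZ (fStep n v st c).1 c'
      = if c' = c ∧ InB n c ∧ cellZ st.1 c = 0 then v else cellZ st.1 c') := by
  by_cases hin : InB n c
  · have ha0 := hin.1.1
    have hb0 := hin.2.1
    have hbr : PySem.List.pyGetD (PySem.List.pyGetD st.1 c.1 []) c.2 0 = cellZ st.1 c :=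
      cellZ_eq_py st.1 c ha0 hb0
    by_cases h0 : cellZ st.1 c = 0
    · have hguard : (0 ≤ c.1 ∧ c.1 < n) ∧ (0 ≤ c.2 ∧ c.2 < n) ∧
          PySem.List.pyGetD (PySem.List.pyGetD st.1 c.1 []) c.2 0 = 0 := by
        exact ⟨hin.1, hin.2, by rw [hbr]; exact h0⟩
      have hw := write_char n st.1 c v hS hin
      simp only [fStep, if_pos hguard]
      refine ⟨hw.1, ?_, ?_⟩
      · rw [if_pos ⟨hin, h0⟩]
      · intro c'
        rw [hw.2 c']
        by_cases heq : c' = c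
        · rw [if_pos heq, if_pos ⟨heq, hin, h0⟩]
        · rw [if_neg heq, if_neg (by tauto)]
    · have hguard : ¬ ((0 ≤ c.1 ∧ c.1 < n) ∧ (0 ≤ c.2 ∧ c.2 < n) ∧
          PySem.List.pyGetD (PySem.List.pyGetD st.1 c.1 []) c.2 0 = 0) := by
        rw [hbr]; tauto
      have hstep : fStep n v st c = st := by simp only [fStep, if_neg hguard]
      rw [hstep]
      refine ⟨rfl, by rw [if_neg (by tauto)]; simp, ?_⟩
      intro c'
      rw [if_neg (by tauto)]
  · have hguard : ¬ ((0 ≤ c.1 ∧ c.1 < n) ∧ (0 ≤ c.2 ∧ c.2 < n) ∧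
        PySem.List.pyGetD (PySem.List.pyGetD st.1 c.1 []) c.2 0 = 0) := by
      intro h; exact hin ⟨h.1, h.2.1⟩
    have hstep : fStep n v st c = st := by simp only [fStep, if_neg hguard]
    rw [hstep]
    refine ⟨rfl, by rw [if_neg (by tauto)]; simp, ?_⟩
    intro c'
    rw [if_neg (by tauto)]

theorem entry_fold (n v : Int) :
    ∀ (L : List (Int × Int)) (st : List (List Int) × List (Int × Int × Int)),
      L.Nodup → ShapeG n st.1 →
    (L.foldl (fStep n v) st).1.map List.length = st.1.map List.length ∧
    (L.foldl (fStep n v) st).2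
      = st.2 ++ L.filterMap (fun c =>
          if InB n c ∧ cellZ st.1 c = 0 then some (v, c) else none) ∧
    (∀ c', cellZ (L.foldl (fStep n v) st).1 c'
      = if c' ∈ L ∧ InB n c' ∧ cellZ st.1 c' = 0 then v else cellZ st.1 c') := by
  intro L
  induction L with
  | nil =>
    intro st _ _
    refine ⟨rfl, by simp, fun c' => by rw [if_neg (by simp)]; rfl⟩
  | cons c L ih =>
    intro st hL hS
    have hcL : c ∉ L := (List.nodup_cons.mp hL).1
    have h1 := fStep_char n v st c hS
    have hS1 : ShapeG n (fStep n v st c).1 := ShapeG_of_mapLen n st.1 _ h1.1 hS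
    have ih1 := ih (fStep n v st c) (List.nodup_cons.mp hL).2 hS1
    have hcell1 : ∀ d, d ≠ c → cellZ (fStep n v st c).1 d = cellZ st.1 d := by
      intro d hd
      rw [h1.2.2 d, if_neg (by tauto)]
    simp only [List.foldl_cons]
    refine ⟨ih1.1.trans h1.1, ?_, ?_⟩
    · rw [ih1.2.1, h1.2.1]
      have hfm : L.filterMap (fun d =>
            if InB n d ∧ cellZ (fStep n v st c).1 d = 0 then some (v, d) else none)
          = L.filterMap (fun d =>
            if InB n d ∧ cellZ st.1 d = 0 then some (v, d) else none) := by
        apply List.filterMap_congr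
        intro d hd
        rw [hcell1 d (fun h => hcL (h ▸ hd))]
      rw [hfm, List.filterMap_cons]
      by_cases hG : InB n c ∧ cellZ st.1 c = 0
      · rw [if_pos hG]
        simp only [if_pos hG, List.append_assoc, List.singleton_append]
      · rw [if_neg hG]
        simp only [if_neg hG, List.append_nil]
    · intro c'
      rw [ih1.2.2 c']
      by_cases hc' : c' = c
      · subst hc'
        rw [if_neg (by tauto), h1.2.2 c']
        by_cases hG : InB n c' ∧ cellZ st.1 c' = 0
        · rw [if_pos ⟨rfl, hG⟩, if_pos ⟨List.mem_cons_self, hG⟩]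
        · rw [if_neg (by tauto), if_neg (by tauto)]
      · rw [hcell1 c' hc']
        by_cases hmem : c' ∈ L ∧ InB n c' ∧ cellZ st.1 c' = 0
        · rw [if_pos hmem, if_pos ⟨List.mem_cons_of_mem c hmem.1, hmem.2⟩]
        · rw [if_neg hmem, if_neg (by
            intro h
            exact hmem ⟨(List.mem_cons.mp h.1).resolve_left hc', h.2⟩)]

theorem layer_master (n : Int) (g : List (List Int)) (f : List (Int × Int × Int))
    (hfne : ∀ e ∈ f, e.1 ≠ 0) :
    ∀ (rest pre : List (Int × Int × Int)) (st : List (List Int) × List (Int × Int × Int)),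
    f = pre ++ rest →
    rest.Pairwise (fun a b => a.1 ≤ b.1) →
    ShapeG n st.1 →
    st.1.map List.length = g.map List.length →
    (∀ p ∈ st.2, InB n p.2 ∧ cellZ g p.2 = 0 ∧ cellZ st.1 p.2 = p.1 ∧ p.1 ≠ 0 ∧
       ∃ e, f.find? (fun e' => decide (p.2 ∈ nbrsOf e'.2)) = some e ∧ e.1 = p.1) →
    (cellsOf st.2).Nodup →
    (∀ c, c ∉ cellsOf st.2 → cellZ st.1 c = cellZ g c) →
    st.2.Pairwise (fun a b => a.1 ≤ b.1) →
    (∀ p ∈ st.2, ∀ e ∈ rest, p.1 ≤ e.1) →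
    (∀ c, InB n c → cellZ g c = 0 → c ∉ cellsOf st.2 → ∀ e ∈ pre, c ∉ nbrsOf e.2) →
    ((bLayerF n st rest).1.map List.length = g.map List.length ∧
     (∀ p ∈ (bLayerF n st rest).2, InB n p.2 ∧ cellZ g p.2 = 0 ∧
        cellZ (bLayerF n st rest).1 p.2 = p.1 ∧ p.1 ≠ 0 ∧
        ∃ e, f.find? (fun e' => decide (p.2 ∈ nbrsOf e'.2)) = some e ∧ e.1 = p.1) ∧
     (cellsOf (bLayerF n st rest).2).Nodup ∧
     (∀ c, c ∉ cellsOf (bLayerF n st rest).2 →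
        cellZ (bLayerF n st rest).1 c = cellZ g c) ∧
     (bLayerF n st rest).2.Pairwise (fun a b => a.1 ≤ b.1) ∧
     (∀ c, InB n c → cellZ g c = 0 → c ∉ cellsOf (bLayerF n st rest).2 →
        ∀ e ∈ f, c ∉ nbrsOf e.2)) := by
  intro rest
  induction rest with
  | nil =>
    intro pre st hsplit _ _ hprof hs2 hs3 hs4 hs5a _ hs6
    have hpre : pre = f := by rw [hsplit, List.append_nil]
    exact ⟨hprof, hs2, hs3, hs4, hs5a, fun c h1 h2 h3 e he => hs6 c h1 h2 h3 e (hpre ▸ he)⟩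
  | cons e rest ih =>
    intro pre st hsplit hrsort hS hprof hs2 hs3 hs4 hs5a hs5b hs6
    have hblock : bLayerF n st (e :: rest) = bLayerF n ((nbrsOf e.2).foldl (fStep n e.1) st) rest := rfl
    rw [hblock]
    have hstep := entry_fold n e.1 (nbrsOf e.2) st (nbrsOf_nodup e.2) hS
    set st1 := (nbrsOf e.2).foldl (fStep n e.1) st with hst1def
    have hef : e ∈ f := by rw [hsplit]; exact List.mem_append_right pre List.mem_cons_self
    have hene : e.1 ≠ 0 := hfne e hef
    have hprof1 : st1.1.map List.length = g.map List.length := hstep.1.trans hprof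
    have hS1 : ShapeG n st1.1 := ShapeG_of_mapLen n st.1 st1.1 hstep.1 hS
    have hnew : ∀ p ∈ (nbrsOf e.2).filterMap (fun c =>
        if InB n c ∧ cellZ st.1 c = 0 then some (e.1, c) else none),
        p.1 = e.1 ∧ p.2 ∈ nbrsOf e.2 ∧ InB n p.2 ∧ cellZ st.1 p.2 = 0 := by
      intro p hp
      obtain ⟨c, hc, hpc⟩ := List.mem_filterMap.mp hp
      by_cases hcond : InB n c ∧ cellZ st.1 c = 0
      · rw [if_pos hcond] at hpc
        obtain rfl : (e.1, c) = p := Option.some.inj hpc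
        exact ⟨rfl, hc, hcond⟩
      · rw [if_neg hcond] at hpc; cases hpc
    have hnotold : ∀ p ∈ (nbrsOf e.2).filterMap (fun c =>
        if InB n c ∧ cellZ st.1 c = 0 then some (e.1, c) else none),
        p.2 ∉ cellsOf st.2 := by
      intro p hp hmem
      obtain ⟨q, hq, hqc⟩ := List.mem_map.mp hmem
      have h2 := hs2 q hq
      have := (hnew p hp).2.2.2
      rw [hqc] at h2
      exact h2.2.2.2.1 (by rw [← h2.2.2.1, this])
    have hg0new : ∀ p ∈ (nbrsOf e.2).filterMap (fun c =>
        if InB n c ∧ cellZ st.1 c = 0 then some (e.1, c) else none),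
        cellZ g p.2 = 0 := by
      intro p hp
      rw [← hs4 p.2 (hnotold p hp)]
      exact (hnew p hp).2.2.2
    have hfind : ∀ p ∈ (nbrsOf e.2).filterMap (fun c =>
        if InB n c ∧ cellZ st.1 c = 0 then some (e.1, c) else none),
        f.find? (fun e' => decide (p.2 ∈ nbrsOf e'.2)) = some e := by
      intro p hp
      have hprenone : pre.find? (fun e' => decide (p.2 ∈ nbrsOf e'.2)) = none := by
        apply List.find?_eq_none.mpr
        intro x hx
        simp only [decide_eq_true_eq]
        exact hs6 p.2 (hnew p hp).2.2.1 (hg0new p hp) (hnotold p hp) x hx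
      rw [hsplit, List.find?_append, hprenone, Option.none_or]
      exact List.find?_cons_of_pos (decide_eq_true (hnew p hp).2.1)
    have hsplit' : f = (pre ++ [e]) ++ rest := by rw [hsplit]; simp
    have hs2' : ∀ p ∈ st1.2, InB n p.2 ∧ cellZ g p.2 = 0 ∧ cellZ st1.1 p.2 = p.1 ∧ p.1 ≠ 0 ∧
        ∃ e', f.find? (fun e'' => decide (p.2 ∈ nbrsOf e''.2)) = some e' ∧ e'.1 = p.1 := by
      intro p hp
      rw [hstep.2.1] at hp
      rcases List.mem_append.mp hp with hold | hnw
      · obtain ⟨hin, hg0, hcell, hne0, hfd⟩ := hs2 p hold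
        refine ⟨hin, hg0, ?_, hne0, hfd⟩
        rw [hstep.2.2 p.2, if_neg (by
          intro hcon
          exact hne0 (by rw [← hcell, hcon.2.2]))]
        exact hcell
      · obtain ⟨hp1, hpnb, hpin, hp0⟩ := hnew p hnw
        refine ⟨hpin, hg0new p hnw, ?_, by rw [hp1]; exact hene, ⟨e, hfind p hnw, hp1.symm⟩⟩
        rw [hstep.2.2 p.2, if_pos ⟨hpnb, hpin, hp0⟩, hp1]
    have hcellsnew : cellsOf ((nbrsOf e.2).filterMap (fun c =>
        if InB n c ∧ cellZ st.1 c = 0 then some (e.1, c) else none))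
        = (nbrsOf e.2).filter (fun c => decide (InB n c ∧ cellZ st.1 c = 0)) := by
      rw [cellsOf, List.map_filterMap]
      rw [← filterMap_guard (nbrsOf e.2) (fun c => InB n c ∧ cellZ st.1 c = 0)]
      apply List.filterMap_congr
      intro c _
      by_cases hcond : InB n c ∧ cellZ st.1 c = 0
      · rw [if_pos hcond, if_pos hcond]; rfl
      · rw [if_neg hcond, if_neg hcond]; rfl
    have hs3' : (cellsOf st1.2).Nodup := by
      rw [hstep.2.1, cellsOf, List.map_append, List.nodup_append]
      refine ⟨hs3, ?_, ?_⟩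
      · rw [show List.map (·.2) ((nbrsOf e.2).filterMap (fun c =>
            if InB n c ∧ cellZ st.1 c = 0 then some (e.1, c) else none)) = cellsOf _ from rfl,
          hcellsnew]
        exact (nbrsOf_nodup e.2).filter _
      · intro a ha b hb hab
        obtain ⟨q, hq, hqa⟩ := List.mem_map.mp hb
        exact hnotold q hq (hqa ▸ hab ▸ ha)
    have hs4' : ∀ c, c ∉ cellsOf st1.2 → cellZ st1.1 c = cellZ g c := by
      intro c hc
      rw [hstep.2.1, cellsOf, List.map_append] at hc
      have hc1 : c ∉ cellsOf st.2 := fun h => hc (List.mem_append_left _ h)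
      rw [hstep.2.2 c, if_neg (by
        rintro ⟨hnb, hin, h0⟩
        apply hc
        apply List.mem_append_right
        apply List.mem_map.mpr
        refine ⟨(e.1, c), ?_, rfl⟩
        apply List.mem_filterMap.mpr
        exact ⟨c, hnb, by rw [if_pos ⟨hin, h0⟩]⟩)]
      exact hs4 c hc1
    have hs5a' : st1.2.Pairwise (fun a b => a.1 ≤ b.1) := by
      rw [hstep.2.1, List.pairwise_append]
      refine ⟨hs5a, ?_, ?_⟩
      · apply List.pairwise_of_forall_mem_list
        intro a ha b hb
        rw [(hnew a ha).1, (hnew b hb).1]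
      · intro a ha b hb
        rw [(hnew b hb).1]
        exact hs5b a ha e List.mem_cons_self
    have hs5b' : ∀ p ∈ st1.2, ∀ e' ∈ rest, p.1 ≤ e'.1 := by
      intro p hp e' he'
      rw [hstep.2.1] at hp
      rcases List.mem_append.mp hp with hold | hnw
      · exact hs5b p hold e' (List.mem_cons_of_mem e he')
      · rw [(hnew p hnw).1]
        exact (List.pairwise_cons.mp hrsort).1 e' he'
    have hs6' : ∀ c, InB n c → cellZ g c = 0 → c ∉ cellsOf st1.2 →
        ∀ x ∈ pre ++ [e], c ∉ nbrsOf x.2 := by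
      intro c hin hg0 hc x hx
      have hc1 : c ∉ cellsOf st.2 := by
        intro h
        apply hc
        rw [hstep.2.1, cellsOf, List.map_append]
        exact List.mem_append_left _ h
      rcases List.mem_append.mp hx with hx | hx
      · exact hs6 c hin hg0 hc1 x hx
      · have hxe : x = e := by simpa using hx
        rw [hxe]
        intro hnb
        apply hc
        rw [hstep.2.1, cellsOf, List.map_append]
        apply List.mem_append_right
        apply List.mem_map.mpr
        refine ⟨(e.1, c), ?_, rfl⟩
        apply List.mem_filterMap.mpr
        exact ⟨c, hnb, by rw [if_pos ⟨hin, by rw [hs4 c hc1]; exact hg0⟩]⟩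
    exact ih (pre ++ [e]) st1 hsplit' (List.pairwise_cons.mp hrsort).2 hS1 hprof1
      hs2' hs3' hs4' hs5a' hs5b' hs6'

-- ---------- B's neighbour minimum vs the first adjacent frontier entry ----------

theorem bmin_fold_min :
    ∀ (l : List Int) (b : Int), b ≠ 0 → (∀ v ∈ l, v ≠ 0) →
      (l.foldl bmin b ∈ b :: l ∧ ∀ v ∈ b :: l, l.foldl bmin b ≤ v) := by
  intro l
  induction l with
  | nil =>
    intro b hb _
    exact ⟨List.mem_cons_self, by simp⟩
  | cons v l ih =>
    intro b hb hl
    have hv : v ≠ 0 := hl v List.mem_cons_self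
    have hacc : bmin b v ≠ 0 := by
      simp only [bmin]; split_ifs <;> assumption
    have hbv : bmin b v ≤ b ∧ bmin b v ≤ v := by
      simp only [bmin, hb, false_or]
      split_ifs with h <;> omega
    have ih1 := ih (bmin b v) hacc (fun x hx => hl x (List.mem_cons_of_mem v hx))
    simp only [List.foldl_cons]
    constructor
    · rcases List.mem_cons.mp ih1.1 with h | h
      · rw [h]
        simp only [bmin, hb, false_or]
        split_ifs
        · exact List.mem_cons_of_mem b List.mem_cons_self
        · exact List.mem_cons_self
      · exact List.mem_cons_of_mem b (List.mem_cons_of_mem v h)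
    · have hle : List.foldl bmin (bmin b v) l ≤ bmin b v := ih1.2 _ List.mem_cons_self
      intro x hx
      rcases List.mem_cons.mp hx with h | h
      · rw [h]; exact le_trans hle hbv.1
      rcases List.mem_cons.mp h with h2 | h2
      · rw [h2]; exact le_trans hle hbv.2
      · exact ih1.2 x (List.mem_cons_of_mem _ h2)

theorem bmin_fold0 (l : List Int) (hl : ∀ v ∈ l, v ≠ 0) (hne : l ≠ []) :
    (l.foldl bmin 0 ∈ l ∧ ∀ v ∈ l, l.foldl bmin 0 ≤ v) := by
  match l with
  | v :: l' =>
    have h0 : bmin 0 v = v := by simp [bmin]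
    simp only [List.foldl_cons, h0]
    exact bmin_fold_min l' v (hl v List.mem_cons_self)
      (fun x hx => hl x (List.mem_cons_of_mem v hx))

theorem bbest_eq_fold (n : Int) (g : List (List Int)) (c : Int × Int) :
    solBBest n g c.1 c.2
      = (((nbrsOf c).filter (fun d => decide (InB n d ∧ cellZ g d ≠ 0))).map
          (cellZ g)).foldl bmin 0 := by
  have haux : ∀ (L : List (Int × Int)) (b : Int),
      L.foldl (fun best d =>
        if (0 ≤ d.1 ∧ d.1 < n) ∧ (0 ≤ d.2 ∧ d.2 < n) ∧
            PySem.List.pyGetD (PySem.List.pyGetD g d.1 []) d.2 0 ≠ 0 then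
          if best = 0 ∨ PySem.List.pyGetD (PySem.List.pyGetD g d.1 []) d.2 0 < best then
            PySem.List.pyGetD (PySem.List.pyGetD g d.1 []) d.2 0
          else best
        else best) b
      = ((L.filter (fun d => decide (InB n d ∧ cellZ g d ≠ 0))).map (cellZ g)).foldl bmin b := by
    intro L
    induction L with
    | nil => intro b; rfl
    | cons d L ihL =>
      intro b
      simp only [List.foldl_cons, List.filter_cons]
      by_cases hin : InB n d
      · have hbr : PySem.List.pyGetD (PySem.List.pyGetD g d.1 []) d.2 0 = cellZ g d :=
          cellZ_eq_py g d hin.1.1 hin.2.1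
        by_cases h0 : cellZ g d ≠ 0
        · rw [if_pos (by rw [hbr]; exact ⟨hin.1, hin.2, h0⟩)]
          rw [if_pos (decide_eq_true ⟨hin, h0⟩)]
          simp only [List.map_cons, List.foldl_cons]
          rw [ihL, hbr]
          rfl
        · rw [if_neg (by rw [hbr]; tauto)]
          rw [if_neg (by simp only [decide_eq_true_eq]; tauto)]
          exact ihL b
      · rw [if_neg (by intro h; exact hin ⟨h.1, h.2.1⟩)]
        rw [if_neg (by simp only [decide_eq_true_eq]; tauto)]
        exact ihL b
  exact haux (nbrsOf c) 0

theorem find?_min (f : List (Int × Int × Int)) (p : Int × Int × Int → Bool)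
    (hsort : f.Pairwise (fun a b => a.1 ≤ b.1)) :
    ∀ e, f.find? p = some e → ∀ x ∈ f, p x → e.1 ≤ x.1 := by
  induction f with
  | nil => intro e he; simp at he
  | cons a f ih =>
    intro e he x hx hpx
    cases hpa : p a with
    | true =>
      rw [List.find?_cons_of_pos hpa] at he
      obtain rfl : a = e := by simpa using he
      rcases List.mem_cons.mp hx with h | h
      · rw [h]
      · exact (List.pairwise_cons.mp hsort).1 x h
    | false =>
      rw [List.find?_cons_of_neg (by simp [hpa])] at he
      rcases List.mem_cons.mp hx with h | h
      · subst h; rw [hpa] at hpx; simp at hpx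
      · exact ih (List.pairwise_cons.mp hsort).2 e he x h hpx

theorem best_find (n : Int) (g : List (List Int)) (f : List (Int × Int × Int)) (c : Int × Int)
    (hf1 : ∀ e ∈ f, InB n e.2 ∧ cellZ g e.2 = e.1 ∧ e.1 ≠ 0)
    (hsort : f.Pairwise (fun a b => a.1 ≤ b.1))
    (hI4 : ∀ d ∈ nbrsOf c, InB n d → cellZ g d ≠ 0 → (cellZ g d, d) ∈ f) :
    (∀ e, f.find? (fun e' => decide (c ∈ nbrsOf e'.2)) = some e →
        solBBest n g c.1 c.2 = e.1) ∧
    (f.find? (fun e' => decide (c ∈ nbrsOf e'.2)) = none → solBBest n g c.1 c.2 = 0) := by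
  have hVL0 : ∀ v ∈ ((nbrsOf c).filter
      (fun d => decide (InB n d ∧ cellZ g d ≠ 0))).map (cellZ g), v ≠ 0 := by
    intro v hv
    obtain ⟨d, hd, hdv⟩ := List.mem_map.mp hv
    have := (List.mem_filter.mp hd).2
    simp only [decide_eq_true_eq] at this
    rw [← hdv]; exact this.2
  constructor
  · intro e he
    have hpe : c ∈ nbrsOf e.2 := by
      have := List.find?_some he
      simpa using this
    have hef : e ∈ f := List.mem_of_find?_eq_some he
    obtain ⟨hein, hecell, heno⟩ := hf1 e hef
    have hdnb : e.2 ∈ nbrsOf c := (nbr_symm c e.2).mpr hpe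
    have he1 : e.1 ∈ ((nbrsOf c).filter
        (fun d => decide (InB n d ∧ cellZ g d ≠ 0))).map (cellZ g) := by
      apply List.mem_map.mpr
      exact ⟨e.2, List.mem_filter.mpr ⟨hdnb, decide_eq_true ⟨hein, by rw [hecell]; exact heno⟩⟩,
        hecell⟩
    have hspec := bmin_fold0 _ hVL0 (List.ne_nil_of_mem he1)
    rw [bbest_eq_fold]
    have h1 : (((nbrsOf c).filter (fun d => decide (InB n d ∧ cellZ g d ≠ 0))).map
        (cellZ g)).foldl bmin 0 ≤ e.1 := hspec.2 _ he1
    have h2 : e.1 ≤ (((nbrsOf c).filter (fun d => decide (InB n d ∧ cellZ g d ≠ 0))).map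
        (cellZ g)).foldl bmin 0 := by
      obtain ⟨d', hd', hdv'⟩ := List.mem_map.mp hspec.1
      have hq := (List.mem_filter.mp hd').2
      simp only [decide_eq_true_eq] at hq
      have hmem := hI4 d' (List.mem_filter.mp hd').1 hq.1 hq.2
      have hpd : (fun e' => decide (c ∈ nbrsOf e'.2)) ((cellZ g d', d')) = true := by
        simpa using (nbr_symm c d').mp (List.mem_filter.mp hd').1
      have := find?_min f _ hsort e he _ hmem hpd
      rw [← hdv']
      exact this
    omega
  · intro hnone
    have hall := List.find?_eq_none.mp hnone
    have hfe : (nbrsOf c).filter (fun d => decide (InB n d ∧ cellZ g d ≠ 0)) = [] := by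
      rw [List.filter_eq_nil_iff]
      intro d hd
      simp only [decide_eq_true_eq, not_and, not_not]
      intro hdin
      by_contra hno
      have hmem := hI4 d hd hdin hno
      have hps := hall _ hmem
      simp only [decide_eq_true_eq] at hps
      exact hps ((nbr_symm c d).mp hd)
    rw [bbest_eq_fold, hfe]
    rfl

-- ---------- B's scan, cell by cell ----------

theorem scanCell_char (n : Int) (g : List (List Int)) (st : List (List Int) × Bool)
    (c : Int × Int) (hin : InB n c) (hS : ShapeG n st.1) :
    (solBScanCell n g st c).1.map List.length = st.1.map List.length ∧
    (∀ c', cellZ (solBScanCell n g st c).1 c'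
       = if c' = c ∧ cellZ g c = 0 ∧ solBBest n g c.1 c.2 ≠ 0
         then solBBest n g c.1 c.2 else cellZ st.1 c') ∧
    (solBScanCell n g st c).2
       = (st.2 || decide (cellZ g c = 0 ∧ solBBest n g c.1 c.2 ≠ 0)) := by
  have hbr : PySem.List.pyGetD (PySem.List.pyGetD g c.1 []) c.2 0 = cellZ g c :=
    cellZ_eq_py g c hin.1.1 hin.2.1
  by_cases h0 : cellZ g c = 0
  · by_cases hb : solBBest n g c.1 c.2 ≠ 0
    · have hstep : solBScanCell n g st c
          = (PySem.List.pySetD st.1 c.1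
              (PySem.List.pySetD (PySem.List.pyGetD st.1 c.1 []) c.2 (solBBest n g c.1 c.2)),
             true) := by
        simp only [solBScanCell, hbr, if_pos h0, if_pos hb]
      rw [hstep]
      have hw := write_char n st.1 c (solBBest n g c.1 c.2) hS hin
      refine ⟨hw.1, ?_, by simp [decide_eq_true (⟨h0, hb⟩ : cellZ g c = 0 ∧ solBBest n g c.1 c.2 ≠ 0)]⟩
      intro c'
      rw [hw.2 c']
      by_cases heq : c' = c
      · rw [if_pos heq, if_pos ⟨heq, h0, hb⟩]
      · rw [if_neg heq, if_neg (by tauto)]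
    · have hstep : solBScanCell n g st c = st := by
        simp only [solBScanCell, hbr, if_pos h0, if_neg hb]
      rw [hstep]
      refine ⟨rfl, fun c' => by rw [if_neg (by tauto)], by
        simp [decide_eq_false (by tauto : ¬ (cellZ g c = 0 ∧ solBBest n g c.1 c.2 ≠ 0))]⟩
  · have hstep : solBScanCell n g st c = st := by
      simp only [solBScanCell, hbr, if_neg h0]
    rw [hstep]
    refine ⟨rfl, fun c' => by rw [if_neg (by tauto)], by
      simp [decide_eq_false (by tauto : ¬ (cellZ g c = 0 ∧ solBBest n g c.1 c.2 ≠ 0))]⟩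

theorem scan_fold_char (n : Int) (g : List (List Int)) :
    ∀ (L : List (Int × Int)) (st : List (List Int) × Bool),
      L.Nodup → (∀ c ∈ L, InB n c) → ShapeG n st.1 →
    ((L.foldl (solBScanCell n g) st).1.map List.length = st.1.map List.length ∧
     (∀ c, cellZ (L.foldl (solBScanCell n g) st).1 c
       = if c ∈ L ∧ cellZ g c = 0 ∧ solBBest n g c.1 c.2 ≠ 0
         then solBBest n g c.1 c.2 else cellZ st.1 c) ∧
     (L.foldl (solBScanCell n g) st).2
       = (st.2 || L.any (fun c =>
           decide (cellZ g c = 0 ∧ solBBest n g c.1 c.2 ≠ 0)))) := by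
  intro L
  induction L with
  | nil =>
    intro st _ _ _
    refine ⟨rfl, fun c => by rw [if_neg (by simp)]; rfl, by simp⟩
  | cons c L ih =>
    intro st hL hLin hS
    have hcL : c ∉ L := (List.nodup_cons.mp hL).1
    have h1 := scanCell_char n g st c (hLin c List.mem_cons_self) hS
    have hS1 : ShapeG n (solBScanCell n g st c).1 := ShapeG_of_mapLen n st.1 _ h1.1 hS
    have ih1 := ih (solBScanCell n g st c) (List.nodup_cons.mp hL).2
      (fun d hd => hLin d (List.mem_cons_of_mem c hd)) hS1
    simp only [List.foldl_cons]
    refine ⟨ih1.1.trans h1.1, ?_, ?_⟩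
    · intro c'
      rw [ih1.2.1 c']
      by_cases hc' : c' = c
      · subst hc'
        rw [if_neg (by tauto), h1.2.1 c']
        by_cases hG : cellZ g c' = 0 ∧ solBBest n g c'.1 c'.2 ≠ 0
        · rw [if_pos ⟨rfl, hG⟩, if_pos ⟨List.mem_cons_self, hG⟩]
        · rw [if_neg (by tauto), if_neg (by tauto)]
      · have hrw : cellZ (solBScanCell n g st c).1 c' = cellZ st.1 c' := by
          rw [h1.2.1 c', if_neg (by tauto)]
        rw [hrw]
        by_cases hmem : c' ∈ L ∧ cellZ g c' = 0 ∧ solBBest n g c'.1 c'.2 ≠ 0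
        · rw [if_pos hmem, if_pos ⟨List.mem_cons_of_mem c hmem.1, hmem.2⟩]
        · rw [if_neg hmem, if_neg (by
            intro h
            exact hmem ⟨(List.mem_cons.mp h.1).resolve_left hc', h.2⟩)]
    · rw [ih1.2.2, h1.2.2]
      simp [Bool.or_assoc]

theorem foldl_pairs {σ : Type} (F : σ → Int × Int → σ) (R C : List Int) (init : σ) :
    R.foldl (fun st i => C.foldl (fun st j => F st (i, j)) st) init
      = (R.flatMap (fun i => C.map (fun j => (i, j)))).foldl F init := by
  induction R generalizing init with
  | nil => rfl
  | cons i R ih => simp [List.foldl_append, List.foldl_map, ih]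

def pairsL (n : Int) : List (Int × Int) :=
  (PySem.List.pyRange 0 n 1).flatMap (fun i => (PySem.List.pyRange 0 n 1).map (fun j => (i, j)))

theorem mem_pairsL (n : Int) (c : Int × Int) : c ∈ pairsL n ↔ InB n c := by
  simp only [pairsL, List.mem_flatMap, List.mem_map, PySem.List.mem_pyRange_one]
  constructor
  · rintro ⟨i, hi, j, hj, rfl⟩
    exact ⟨hi, hj⟩
  · rintro ⟨h1, h2⟩
    exact ⟨c.1, h1, c.2, h2, rfl⟩

theorem nodup_pairsL (n : Int) : (pairsL n).Nodup := by
  rw [pairsL, List.nodup_flatMap]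
  constructor
  · intro i _
    exact (PySem.List.nodup_pyRange_one 0 n).map (fun a b h => by cases h; rfl)
  · have := PySem.List.pairwise_lt_pyRange_one 0 n
    apply List.Pairwise.imp _ this
    intro a b hab
    intro x hxa hxb
    obtain ⟨j1, _, rfl⟩ := List.mem_map.mp hxa
    obtain ⟨j2, _, he⟩ := List.mem_map.mp hxb
    have : b = a := by
      have := congrArg Prod.fst he
      simpa using this
    omega

-- ---------- one generation: layer = scan ----------

theorem gen_eq (n : Int) (g : List (List Int)) (f : List (Int × Int × Int))
    (hInv : InvF n g f) :
    (solBGen n g).1 = (bLayerF n (g, []) f).1 ∧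
    ((solBGen n g).2 = true ↔ (bLayerF n (g, []) f).2 ≠ []) ∧
    InvF n (bLayerF n (g, []) f).1 (bLayerF n (g, []) f).2 ∧
    ((bLayerF n (g, []) f).2 ≠ [] →
      zerosG (bLayerF n (g, []) f).1 < zerosG g) := by
  obtain ⟨hS, hf1, hf2, hf3, hf4⟩ := hInv
  have hfne : ∀ e ∈ f, e.1 ≠ 0 := fun e he => (hf1 e he).2.2
  have hM := layer_master n g f hfne f [] (g, [])
    (by simp) hf3 hS rfl (by simp) (by simp [cellsOf]) (fun c _ => rfl)
    (by simp) (by simp) (by simp)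
  obtain ⟨hMprof, hMs2, hMs3, hMs4, hMs5, hMs6⟩ := hM
  have hscan0 : solBGen n g = (pairsL n).foldl (solBScanCell n g) (g, false) := by
    rw [solBGen, pairsL, foldl_pairs]
  have hSC := scan_fold_char n g (pairsL n) (g, false) (nodup_pairsL n)
    (fun c hc => (mem_pairsL n c).mp hc) hS
  have hcond_mem : ∀ c, (InB n c ∧ cellZ g c = 0 ∧ solBBest n g c.1 c.2 ≠ 0) ↔
      c ∈ cellsOf (bLayerF n (g, []) f).2 := by
    intro c
    constructor
    · rintro ⟨hin, h0, hbne⟩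
      by_contra hnot
      have hnone : f.find? (fun e' => decide (c ∈ nbrsOf e'.2)) = none := by
        apply List.find?_eq_none.mpr
        intro x hx
        simpa using hMs6 c hin h0 hnot x hx
      exact hbne ((best_find n g f c hf1 hf3 (hf4 c hin h0)).2 hnone)
    · intro hc
      obtain ⟨p, hp, hpc⟩ := List.mem_map.mp hc
      obtain ⟨hin, h0, hcell, hne0, e0, hfind, he0⟩ := hMs2 p hp
      rw [hpc] at hin h0 hfind
      refine ⟨hin, h0, ?_⟩
      rw [(best_find n g f c hf1 hf3 (hf4 c hin h0)).1 e0 hfind, he0]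
      exact hne0
  have hval : ∀ c, c ∈ cellsOf (bLayerF n (g, []) f).2 →
      cellZ (bLayerF n (g, []) f).1 c = solBBest n g c.1 c.2 := by
    intro c hc
    obtain ⟨p, hp, hpc⟩ := List.mem_map.mp hc
    obtain ⟨hin, h0, hcell, hne0, e0, hfind, he0⟩ := hMs2 p hp
    rw [hpc] at hin h0 hfind hcell
    rw [hcell, (best_find n g f c hf1 hf3 (hf4 c hin h0)).1 e0 hfind, he0]
  have hgrid : (solBGen n g).1 = (bLayerF n (g, []) f).1 := by
    rw [hscan0]
    apply grid_ext
    · exact hSC.1.trans hMprof.symm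
    · intro c
      rw [hSC.2.1 c]
      by_cases hcnd : c ∈ pairsL n ∧ cellZ g c = 0 ∧ solBBest n g c.1 c.2 ≠ 0
      · rw [if_pos hcnd]
        have hmem := (hcond_mem c).mp ⟨(mem_pairsL n c).mp hcnd.1, hcnd.2⟩
        rw [hval c hmem]
      · rw [if_neg hcnd]
        have hnot : c ∉ cellsOf (bLayerF n (g, []) f).2 := by
          intro h
          obtain ⟨hin, h0, hb⟩ := (hcond_mem c).mpr h
          exact hcnd ⟨(mem_pairsL n c).mpr hin, h0, hb⟩
        rw [hMs4 c hnot]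
  have hflag : (solBGen n g).2 = true ↔ (bLayerF n (g, []) f).2 ≠ [] := by
    rw [hscan0, hSC.2.2]
    simp only [Bool.false_or]
    rw [List.any_eq_true]
    constructor
    · rintro ⟨c, hcL, hcd⟩
      simp only [decide_eq_true_eq] at hcd
      have hmem := (hcond_mem c).mp ⟨(mem_pairsL n c).mp hcL, hcd⟩
      intro hnil
      rw [hnil] at hmem
      simp [cellsOf] at hmem
    · intro hne
      obtain ⟨p, hp⟩ := List.exists_mem_of_ne_nil _ hne
      have hc := (hcond_mem p.2).mpr (List.mem_map_of_mem hp)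
      exact ⟨p.2, (mem_pairsL n p.2).mpr hc.1, decide_eq_true ⟨hc.2.1, hc.2.2⟩⟩
  refine ⟨hgrid, hflag, ?_, ?_⟩
  · refine ⟨ShapeG_of_mapLen n g _ hMprof hS, ?_, hMs3, hMs5, ?_⟩
    · intro p hp
      obtain ⟨hin, _, hcell, hne0, _⟩ := hMs2 p hp
      exact ⟨hin, hcell, hne0⟩
    · intro c hin h0 d hd hdin hdnz
      have hcnot : c ∉ cellsOf (bLayerF n (g, []) f).2 := by
        intro h
        obtain ⟨p, hp, hpc⟩ := List.mem_map.mp h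
        obtain ⟨_, _, hcell, hne0, _⟩ := hMs2 p hp
        rw [hpc] at hcell
        exact hne0 (by rw [← hcell, h0])
      have hgc0 : cellZ g c = 0 := by rw [← hMs4 c hcnot]; exact h0
      by_cases hdmem : d ∈ cellsOf (bLayerF n (g, []) f).2
      · obtain ⟨p, hp, hpc⟩ := List.mem_map.mp hdmem
        obtain ⟨_, _, hcell, _, _⟩ := hMs2 p hp
        rw [hpc] at hcell
        have hpe : (cellZ (bLayerF n (g, []) f).1 d, d) = p := by
          rw [hcell, ← hpc]
        rw [hpe]
        exact hp
      · have hdg : cellZ (bLayerF n (g, []) f).1 d = cellZ g d := hMs4 d hdmem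
        have hdnz' : cellZ g d ≠ 0 := by rw [← hdg]; exact hdnz
        have hmem := hf4 c hin hgc0 d hd hdin hdnz'
        rw [hdg]
        exact absurd ((nbr_symm c d).mp hd) (hMs6 c hin hgc0 hcnot _ hmem)
  · intro hne
    have hz := layer_inv n f (g, []) hfne (by simp) hS
    have hlen : 0 < (bLayerF n (g, []) f).2.length := List.length_pos_iff.mpr hne
    have hz2 := hz.2.1
    simp only [List.length_nil, Nat.add_zero] at hz2
    omega

-- ---------- the two loops ----------

theorem loopF_nil (fuel : Nat) (n tS s : Int) (g : List (List Int)) :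
    loopF fuel n tS s g [] = g := by
  cases fuel <;> rfl

theorem loopF_stop (fuel : Nat) (n tS s : Int) (g : List (List Int))
    (e : Int × Int × Int) (f' : List (Int × Int × Int)) (hs : s = tS) :
    loopF fuel n tS s g (e :: f') = g := by
  cases fuel <;> (rw [loopF.eq_def]; simp [hs])

theorem loopF_step (fa : Nat) (n tS s : Int) (g : List (List Int))
    (e : Int × Int × Int) (f' : List (Int × Int × Int)) (hs : ¬ s = tS) :
    loopF (fa + 1) n tS s g (e :: f')
      = loopF fa n tS (s + 1) (bLayerF n (g, []) (e :: f')).1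
          (bLayerF n (g, []) (e :: f')).2 := by
  rw [loopF.eq_def]
  simp [hs]

theorem solBLoop_stop (fuel : Nat) (n tS s : Int) (g : List (List Int)) (hs : s = tS) :
    solBLoop fuel n tS s g = g := by
  cases fuel <;> (rw [solBLoop.eq_def]; simp [hs])

theorem solBLoop_step (fb : Nat) (n tS s : Int) (g : List (List Int)) (hs : ¬ s = tS) :
    solBLoop (fb + 1) n tS s g
      = (if (solBGen n g).2 then solBLoop fb n tS (s + 1) (solBGen n g).1
         else (solBGen n g).1) := by
  rw [solBLoop.eq_def]
  simp [hs]

theorem loop_rel (n tS : Int) :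
    ∀ (fuelB : Nat) (s : Int) (g : List (List Int)) (f : List (Int × Int × Int))
      (fuelA : Nat), InvF n g f → zerosG g < fuelA → zerosG g < fuelB →
    loopF fuelA n tS s g f = solBLoop fuelB n tS s g := by
  intro fuelB
  induction fuelB with
  | zero => intro s g f fuelA _ _ hB; omega
  | succ fb ih =>
    intro s g f fuelA hInv hA hB
    have hG := gen_eq n g f hInv
    by_cases hs : s = tS
    · rw [solBLoop_stop _ _ _ _ _ hs]
      cases f with
      | nil => exact loopF_nil fuelA n tS s g
      | cons e f' => exact loopF_stop fuelA n tS s g e f' hs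
    · rw [solBLoop_step fb n tS s g hs]
      cases f with
      | nil =>
        rw [loopF_nil]
        have h2 : (solBGen n g).2 = false := by
          rcases Bool.eq_false_or_eq_true (solBGen n g).2 with h | h
          · exact absurd (hG.2.1.mp h) (by simp [bLayerF])
          · exact h
        rw [h2]
        simp only [Bool.false_eq_true, if_false]
        exact hG.1.symm
      | cons e f' =>
        match fuelA with
        | 0 => omega
        | fa + 1 =>
          rw [loopF_step fa n tS s g e f' hs]
          by_cases hemp : (bLayerF n (g, []) (e :: f')).2 = []
          · have h2 : (solBGen n g).2 = false := by
              rcases Bool.eq_false_or_eq_true (solBGen n g).2 with h | h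
              · exact absurd (hG.2.1.mp h) (by simp [hemp])
              · exact h
            rw [h2]
            simp only [Bool.false_eq_true, if_false]
            rw [hemp, loopF_nil]
            exact hG.1.symm
          · have h2 : (solBGen n g).2 = true := hG.2.1.mpr hemp
            rw [h2]
            simp only [if_true]
            rw [hG.1]
            have hzlt := hG.2.2.2 hemp
            exact ih (s + 1) (bLayerF n (g, []) (e :: f')).1
              (bLayerF n (g, []) (e :: f')).2 fa hG.2.2.1 (by omega) (by omega)

-- ---------- initial frontier ----------

theorem seedsB_mem (n : Int) (graph : List (List Int)) (e : Int × Int × Int) :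
    e ∈ seedsB n graph ↔ ∃ i j : Int, (0 ≤ i ∧ i < n) ∧ (0 ≤ j ∧ j < n) ∧
      PySem.List.pyGetD (PySem.List.pyGetD graph i []) j 0 ≠ 0 ∧
      e = (PySem.List.pyGetD (PySem.List.pyGetD graph i []) j 0, i, j) := by
  rw [seedsB_flat]
  simp only [List.mem_flatMap, List.mem_map, List.mem_filter, PySem.List.mem_pyRange_one,
    decide_eq_true_eq]
  constructor
  · rintro ⟨i, hi, j, ⟨hj, hne⟩, rfl⟩
    exact ⟨i, j, hi, hj, hne, rfl⟩
  · rintro ⟨i, j, hi, hj, hne, rfl⟩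
    exact ⟨i, hi, j, ⟨hj, hne⟩, rfl⟩

theorem nodup_cells_seeds (n : Int) (graph : List (List Int)) :
    (cellsOf (seedsB n graph)).Nodup := by
  rw [seedsB_flat, cellsOf, List.map_flatMap]
  simp only [List.map_map]
  rw [List.nodup_flatMap]
  constructor
  · intro i _
    exact ((PySem.List.nodup_pyRange_one 0 n).filter _).map
      (fun a b h => congrArg Prod.snd h)
  · have := PySem.List.pairwise_lt_pyRange_one 0 n
    apply List.Pairwise.imp _ this
    intro a b hab x hxa hxb
    obtain ⟨j1, _, hj1⟩ := List.mem_map.mp hxa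
    obtain ⟨j2, _, hj2⟩ := List.mem_map.mp hxb
    have h1 : x.1 = a := by rw [← hj1]; rfl
    have h2 : x.1 = b := by rw [← hj2]; rfl
    omega

theorem init_inv (n : Int) (graph : List (List Int)) (hS : ShapeG n graph) :
    InvF n graph (PySem.List.sorted (seedsB n graph) (fun t => t.1) false) := by
  refine ⟨hS, ?_, ?_, PySem.List.sorted_pairwise _ _, ?_⟩
  · intro e he
    have hm := (PySem.List.mem_sorted _ _ _ _).mp he
    obtain ⟨i, j, hi, hj, hne, rfl⟩ := (seedsB_mem n graph e).mp hm
    exact ⟨⟨hi, hj⟩, (cellZ_eq_py graph (i, j) hi.1 hj.1).symm, hne⟩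
  · have hperm := PySem.List.sorted_perm (seedsB n graph) (fun t => t.1) false
    have hpermc : (cellsOf (PySem.List.sorted (seedsB n graph) (fun t => t.1) false)).Perm
        (cellsOf (seedsB n graph)) := hperm.map _
    exact List.Perm.nodup hpermc.symm (nodup_cells_seeds n graph)
  · intro c hin h0 d hd hdin hdnz
    apply (PySem.List.mem_sorted _ _ _ _).mpr
    apply (seedsB_mem n graph _).mpr
    refine ⟨d.1, d.2, hdin.1, hdin.2, ?_, ?_⟩
    · rw [cellZ_eq_py graph d hdin.1.1 hdin.2.1]
      exact hdnz
    · rw [cellZ_eq_py graph d hdin.1.1 hdin.2.1]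

-- ---------- assembling the two halves ----------

theorem A_eq_mid (n : Int) (k : Int) (array : List (List Int))
    (hpre : Pre_solution n k array) : solution n k array = midSolution n k array := by
  obtain ⟨_, _, h3, _, _⟩ := hpre
  simp only [solution, midSolution]
  rw [builder_eq, sorted_map_tag, List.length_map]
  have hseeds : ∀ e ∈ PySem.List.sorted (seedsB n (PySem.List.slice array none (some n)))
      (fun t => t.1) false, e.1 ≠ (0 : Int) := by
    intro e he
    have hm := (PySem.List.mem_sorted _ _ _ _).mp he
    obtain ⟨i, j, _, _, hne, hee⟩ := (seedsB_mem n _ e).mp hm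
    rw [hee]
    exact hne
  by_cases hn : 0 < n
  · obtain ⟨hle, hrows⟩ := h3 hn
    have hg : PySem.List.slice array none (some n) = array.take n.toNat :=
      PySem.List.slice_to array (le_of_lt hn)
    have hShape : ShapeG n (PySem.List.slice array none (some n)) := by
      constructor
      · rw [hg, List.length_take]
        omega
      · intro r hr
        rw [hg] at hr
        have := hrows r hr
        omega
    rw [run_rel n (PySem.List.pyGetD (PySem.List.pyGetD array n []) 0 0)
      (((PySem.List.slice array none (some n)).flatMap (fun r => r)).length + 1) 0 _ _ _
      hShape hseeds
      (by have := zerosG_le_flatlen (PySem.List.slice array none (some n)); omega)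
      (by have := zerosG_le_flatlen (PySem.List.slice array none (some n)); omega)]
  · have hr0 : PySem.List.pyRange 0 n 1 = [] := PySem.List.pyRange_one_eq_nil (by omega)
    have hseeds0 : seedsB n (PySem.List.slice array none (some n)) = [] := by
      rw [seedsB, hr0]; rfl
    rw [hseeds0]
    have hs0 : PySem.List.sorted ([] : List (Int × Int × Int)) (fun t => t.1) false = [] := by
      rw [PySem.List.sorted_eq_nil_iff]
    rw [hs0]
    simp only [List.map_nil, List.length_nil]
    rw [solutionLoopA.eq_def, loopF.eq_def]

theorem mid_eq_alt (n : Int) (k : Int) (array : List (List Int))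
    (hpre : Pre_solution n k array) : midSolution n k array = solution_alt n k array := by
  obtain ⟨_, _, h3, _, _⟩ := hpre
  simp only [midSolution, solution_alt]
  by_cases hn : 0 < n
  · obtain ⟨hle, hrows⟩ := h3 hn
    have hg : PySem.List.slice array none (some n) = array.take n.toNat :=
      PySem.List.slice_to array (le_of_lt hn)
    have hShape : ShapeG n (PySem.List.slice array none (some n)) := by
      constructor
      · rw [hg, List.length_take]
        omega
      · intro r hr
        rw [hg] at hr
        have := hrows r hr
        omega
    have hInv := init_inv n (PySem.List.slice array none (some n)) hShape
    have hz := zerosG_le_flatlen (PySem.List.slice array none (some n))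
    rw [loop_rel n (PySem.List.pyGetD (PySem.List.pyGetD array n []) 0 0)
      (((PySem.List.slice array none (some n)).flatMap (fun r => r)).length + 1) 0
      (PySem.List.slice array none (some n)) _
      (((PySem.List.slice array none (some n)).flatMap (fun r => r)).length + 1)
      hInv (by omega) (by omega)]
  · have hr0 : PySem.List.pyRange 0 n 1 = [] := PySem.List.pyRange_one_eq_nil (by omega)
    have hseeds0 : seedsB n (PySem.List.slice array none (some n)) = [] := by
      rw [seedsB, hr0]; rfl
    rw [hseeds0]
    have hs0 : PySem.List.sorted ([] : List (Int × Int × Int)) (fun t => t.1) false = [] := by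
      rw [PySem.List.sorted_eq_nil_iff]
    rw [hs0, loopF_nil]
    have halt : solBLoop
        (((PySem.List.slice array none (some n)).flatMap (fun r => r)).length + 1) n
        (PySem.List.pyGetD (PySem.List.pyGetD array n []) 0 0) 0
        (PySem.List.slice array none (some n)) = PySem.List.slice array none (some n) := by
      by_cases h0 : (0 : Int) = PySem.List.pyGetD (PySem.List.pyGetD array n []) 0 0
      · exact solBLoop_stop _ _ _ _ _ h0
      · rw [solBLoop_step _ _ _ _ _ h0]
        have hgen : solBGen n (PySem.List.slice array none (some n))
            = (PySem.List.slice array none (some n), false) := by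
          rw [solBGen, hr0]; rfl
        rw [hgen]
        simp
    rw [halt]

-- ===== VERDICT (by name: the statement is the Claim_ definition above) =====
theorem solution_spec : Claim_equal_solution := by
  intro n k array _ hpre
  unfold Spec_solution
  rw [A_eq_mid n k array hpre, mid_eq_alt n k array hpre]
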